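-- pv_equiv track=rewrite | github.com/RobErdei/password-cypher | Pages/KeyGen.py | sequenceBreak
-- ===== SOURCE A (Python) =====
-- def sequenceBreak(seqStr):
--     """
--     Splits sequence into key sets.
--
--     Args:
--         seqStr: A sequence string of key sets with each set denoted by an alpha-numeric character and an integer of varying digits.
--
--     return:
--         A list of key set headers
--     """
--     result = []
--     current = ''
--
--     for char in seqStr:
--         if char.isalpha():
--             if current:
--                 result.append(current)
--                 current = char
--             else:
--                 current += char
--         else:
--             current += char
--     if current:
--         result.append(current)
--
--     return result
-- ===== SOURCE B (Python) =====
-- def sequenceBreak(seqStr):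
--     out = []
--     rest = seqStr
--     while rest:
--         k = 1
--         while k < len(rest) and not rest[k].isalpha():
--             k += 1
--         out.append(rest[:k])
--         rest = rest[k:]
--     return out
-- ===== Notes on version B (the rewrite author's own statement) =====
-- stated objective: alternative
-- what changed: Replaces A's single-pass accumulator-with-flush character loop by a two-pointer token slicer: each outer step scans past the head char's non-alpha run and slices off one whole token.
import Mathlib
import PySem

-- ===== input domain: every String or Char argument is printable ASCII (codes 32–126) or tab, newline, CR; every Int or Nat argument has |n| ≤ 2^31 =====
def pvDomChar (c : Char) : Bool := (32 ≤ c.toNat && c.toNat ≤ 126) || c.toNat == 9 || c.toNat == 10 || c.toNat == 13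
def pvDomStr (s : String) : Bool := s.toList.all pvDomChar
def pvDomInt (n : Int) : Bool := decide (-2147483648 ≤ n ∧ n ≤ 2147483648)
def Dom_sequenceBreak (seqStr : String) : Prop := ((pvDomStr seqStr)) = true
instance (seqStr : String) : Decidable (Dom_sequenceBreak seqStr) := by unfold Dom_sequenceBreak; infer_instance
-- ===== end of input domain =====

-- B is a different decomposition of the same split: a recursion slicing off one token per call.

-- ===== PORT A =====
-- A's loop body: state = (result, current); current kept as List Char (Python's growing string).
def sbStep (st : List (List Char) × List Char) (c : Char) : List (List Char) × List Char :=
  if c.isAlpha then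
    if st.2 ≠ [] then (st.1 ++ [st.2], [c]) else (st.1, st.2 ++ [c])
  else (st.1, st.2 ++ [c])

def sequenceBreak (seqStr : String) : List String :=
  let st := seqStr.toList.foldl sbStep ([], [])
  (if st.2 ≠ [] then st.1 ++ [st.2] else st.1).map String.mk

-- ===== PORT B =====
-- the inner `while` of Source B: split cs into its leading non-alpha run and the rest
def sbSpan : List Char → List Char × List Char
  | [] => ([], [])
  | d :: ds => if d.isAlpha then ([], d :: ds) else ((sbSpan ds).1.cons d, (sbSpan ds).2)

theorem sbSpan_snd_le (cs : List Char) : (sbSpan cs).2.length ≤ cs.length := by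
  induction cs with
  | nil => simp [sbSpan]
  | cons d ds ih => simp only [sbSpan]; split <;> simp <;> omega

-- the outer `while rest:` loop of Source B, with `out` as the accumulator
def sbGo (out : List String) : List Char → List String
  | [] => out
  | c :: rest => sbGo (out ++ [String.mk (c :: (sbSpan rest).1)]) (sbSpan rest).2
termination_by l => l.length
decreasing_by simpa using Nat.lt_succ_of_le (sbSpan_snd_le rest)

def sequenceBreak_alt (seqStr : String) : List String := sbGo [] seqStr.toList

-- ===== PRECONDITION & SPEC =====
def Spec_sequenceBreak (seqStr : String) (out : List String) : Prop := out = sequenceBreak_alt seqStr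
instance (seqStr : String) (out : List String) : Decidable (Spec_sequenceBreak seqStr out) := by unfold Spec_sequenceBreak; infer_instance

-- ===== CLAIM (what is proved, stated in full; the proofs are below) =====
def Claim_equal_sequenceBreak : Prop := ∀ (seqStr : String), Dom_sequenceBreak seqStr → Spec_sequenceBreak seqStr (sequenceBreak seqStr)

-- ===== LEMMAS AND PROOFS =====
-- pure (accumulator-free) reading of B's outer loop, for the proofs
def sbTokens : List Char → List String
  | [] => []
  | c :: rest => String.mk (c :: (sbSpan rest).1) :: sbTokens (sbSpan rest).2
termination_by l => l.length
decreasing_by simpa using Nat.lt_succ_of_le (sbSpan_snd_le rest)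

theorem sbGo_eq (out : List String) (l : List Char) : sbGo out l = out ++ sbTokens l := by
  fun_induction sbGo out l with
  | case1 out => simp [sbTokens]
  | case2 out c rest ih => rw [ih]; simp [sbTokens]

-- loop invariant: once `current` is nonempty, A's remaining fold produces exactly
-- `current` extended by the leading non-alpha run, then B's tokens of the rest.
theorem sb_loop (cs : List Char) : ∀ (res : List (List Char)) (cur : List Char), cur ≠ [] →
    (let st := cs.foldl sbStep (res, cur)
     (if st.2 ≠ [] then st.1 ++ [st.2] else st.1).map String.mk)
    = res.map String.mk ++ (String.mk (cur ++ (sbSpan cs).1) :: sbTokens (sbSpan cs).2) := by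
  induction cs with
  | nil =>
    intro res cur hcur
    simp [sbSpan, sbTokens, hcur]
  | cons c cs ih =>
    intro res cur hcur
    by_cases hc : c.isAlpha
    · have := ih (res ++ [cur]) [c] (by simp)
      simp only [List.foldl_cons, sbStep, hc, if_pos, hcur, ite_true, ne_eq,
        not_false_eq_true, if_true] at this ⊢
      rw [this]
      simp [sbSpan, sbTokens, hc]
    · have := ih res (cur ++ [c]) (by simp)
      simp only [List.foldl_cons, sbStep, hc, Bool.false_eq_true, if_false] at this ⊢
      rw [this]
      simp [sbSpan, hc]
theorem sb_main (s : String) : sequenceBreak s = sequenceBreak_alt s := by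
  unfold sequenceBreak sequenceBreak_alt
  cases h : s.toList with
  | nil => simp [sbGo]
  | cons c cs =>
    have hstep : sbStep ([], []) c = ([], [c]) := by
      unfold sbStep; split <;> simp
    rw [List.foldl_cons, hstep, sb_loop cs [] [c] (by simp), sbGo_eq]
    simp [sbTokens]

-- ===== VERDICT (by name: the statement is the Claim_ definition above) =====
theorem sequenceBreak_spec : Claim_equal_sequenceBreak := by
  intro s _
  unfold Spec_sequenceBreak
  exact sb_main s
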